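-- pv_equiv track=rewrite | github.com/Alef-Keuffer/LA2 | treino1/treino1.py | hacker
-- ===== SOURCE A (Python) =====
-- def merge(old, new):
--     merged = ""
--     if len(old) != len(new):
--         return new  # Contradição
--     for old, new in zip(old, new):
--         merged += new if new != "*" else old
--     return merged
--
-- def num_of_revealed_char(s):
--     return len(list(filter(lambda x: x != '*', s)))
--
-- def hacker(log):
--     p = {}
--     for x in log:
--         if x[1] in p:
--             p[x[1]] = merge(p[x[1]], x[0])
--         else:
--             p[x[1]] = x[0]
--     r = sorted(p.items(), key=lambda s: s[0])  # r = sorted(p.items(), key=lambda x: x[0].lower())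
--     r = sorted(
--         [(x[1], x[0]) for x in r],
--         key=lambda s: num_of_revealed_char(s[0]),
--         reverse=True)
--     # r.sort(key = lambda x: num_of_revealed_char(x[1]), reverse = True)
--     return r
-- ===== SOURCE B (Python) =====
-- def hacker(log):
--     def squash(vals):
--         acc = vals[0]
--         for v in vals[1:]:
--             if len(v) != len(acc):
--                 acc = v
--             else:
--                 acc = ''.join(o if n == '*' else n for o, n in zip(acc, v))
--         return acc
--     keys = sorted({k for _, k in log})
--     pairs = [(squash([v for v, k2 in log if k2 == k]), k) for k in keys]
--     return sorted(pairs, key=lambda t: -sum(c != '*' for c in t[0]))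
-- ===== Notes on version B (the rewrite author's own statement) =====
-- stated objective: simpler
-- what changed: B replaces A's incremental dict-merge pass plus two chained stable sorts by grouping the log per sorted distinct key (merging each group left to right) and a single sort on the negated revealed-char count.
import Mathlib
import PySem

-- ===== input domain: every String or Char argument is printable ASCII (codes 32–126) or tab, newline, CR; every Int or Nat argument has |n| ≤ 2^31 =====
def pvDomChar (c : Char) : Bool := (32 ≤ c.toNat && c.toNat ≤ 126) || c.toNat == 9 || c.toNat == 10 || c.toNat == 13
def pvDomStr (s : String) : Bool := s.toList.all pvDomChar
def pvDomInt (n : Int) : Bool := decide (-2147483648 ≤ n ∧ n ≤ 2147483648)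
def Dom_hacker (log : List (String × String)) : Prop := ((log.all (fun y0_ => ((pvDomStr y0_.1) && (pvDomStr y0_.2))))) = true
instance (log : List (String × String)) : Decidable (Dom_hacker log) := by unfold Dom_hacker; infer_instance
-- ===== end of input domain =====

-- B replaces A's dict-merge pass and two chained stable sorts by a group-by-sorted-key pass and ONE sort
-- on the negated revealed-char count (objective: simpler — one sort, no dict).

-- ===== PORT A =====
-- merge(old, new): char-by-char string accumulation over zip (string lengths via toList, kernel-transparent)
def pvMergeA (old new : String) : String :=
  if old.toList.length ≠ new.toList.length then new
  else String.ofList ((old.toList.zip new.toList).foldl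
    (fun merged on => merged ++ [if on.2 ≠ '*' then on.2 else on.1]) [])

-- num_of_revealed_char(s) = len(list(filter(lambda x: x != '*', s)))
def pvNumRevealedA (s : String) : Nat := (s.toList.filter (fun x => x ≠ '*')).length

def hacker (log : List (String × String)) : List (String × String) :=
  PySem.List.sorted
    ((PySem.List.sorted
        (log.foldl (fun p x =>
          if p.contains x.2 then p.insert x.2 (pvMergeA (p.getD x.2 "") x.1)
          else p.insert x.2 x.1) (PySem.Dict.empty : PySem.Dict String String)).items
        (fun s => s.1) false).map (fun x => (x.2, x.1)))
    (fun s => pvNumRevealedA s.1) true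

-- ===== PORT B =====
-- squash's loop body: contradiction rule / positional merge via zip+map
def pvMergeB (acc v : String) : String :=
  if v.toList.length ≠ acc.toList.length then v
  else String.ofList ((acc.toList.zip v.toList).map (fun on => if on.2 = '*' then on.1 else on.2))

-- squash(vals): left fold of the merge rule over the tail ("" is never reached: vals is nonempty at every call)
def pvSquash (vals : List String) : String :=
  match vals with
  | [] => ""
  | v :: rest => rest.foldl pvMergeB v

-- -sum(c != '*' for c in t[0])
def pvNegRevealedB (s : String) : Int := -((s.toList.countP (fun c => c ≠ '*') : Int))

def hacker_alt (log : List (String × String)) : List (String × String) :=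
  PySem.List.sorted
    ((PySem.List.sorted (PySem.Set.ofList (log.map (fun x => x.2))) (fun k => k) false).map
      (fun k => (pvSquash ((log.filter (fun x => x.2 == k)).map (fun x => x.1)), k)))
    (fun t => pvNegRevealedB t.1) false

-- ===== PRECONDITION & SPEC =====
def Spec_hacker (log : List (String × String)) (out : List (String × String)) : Prop := out = hacker_alt log
instance (log : List (String × String)) (out : List (String × String)) : Decidable (Spec_hacker log out) := by unfold Spec_hacker; infer_instance

-- ===== CLAIM (what is proved, stated in full; the proofs are below) =====
def Claim_equal_hacker : Prop := ∀ (log : List (String × String)), Dom_hacker log → Spec_hacker log (hacker log)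

-- ===== LEMMAS AND PROOFS =====

-- A's loop body, named for the proofs
def pvStep (p : PySem.Dict String String) (x : String × String) : PySem.Dict String String :=
  if p.contains x.2 then p.insert x.2 (pvMergeA (p.getD x.2 "") x.1) else p.insert x.2 x.1

def pvValsOf (log : List (String × String)) (k : String) : List String :=
  (log.filter (fun x => x.2 == k)).map (fun x => x.1)

def pvComb (o : Option String) (v : String) : Option String :=
  some (match o with | some a => pvMergeA a v | none => v)

lemma pvMergeA_eq_B : pvMergeA = pvMergeB := by
  funext a v
  unfold pvMergeA pvMergeB
  rw [PySem.List.foldl_append_singleton_eq_map]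
  have h1 : (a.toList.length ≠ v.toList.length) ↔ (v.toList.length ≠ a.toList.length) := ne_comm
  simp only [List.nil_append, h1]
  refine congrArg _ (congrArg String.ofList (List.map_congr_left ?_))
  intro on _
  by_cases h : on.2 = '*' <;> simp [h]

lemma pvStep_eq_insert : pvStep = fun p x =>
    p.insert x.2 (if p.contains x.2 then pvMergeA (p.getD x.2 "") x.1 else x.1) := by
  funext p x
  unfold pvStep
  by_cases h : p.contains x.2 <;> simp [h]

lemma get?_fold (log : List (String × String)) (d : PySem.Dict String String) (k : String) :
    (log.foldl pvStep d).get? k = (pvValsOf log k).foldl pvComb (d.get? k) := by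
  induction log generalizing d with
  | nil => rfl
  | cons x t ih =>
    simp only [List.foldl_cons, ih, pvValsOf, List.filter_cons]
    by_cases h : x.2 = k
    · subst h
      simp only [beq_self_eq_true, if_pos, List.map_cons, List.foldl_cons]
      congr 1
      cases hd : d.get? x.2 with
      | none =>
        have hc : d.contains x.2 = false := by
          rw [PySem.Dict.contains_eq_isSome_get?, hd]; rfl
        simp [pvStep, hc, pvComb]
      | some a =>
        have hc : d.contains x.2 = true := by
          rw [PySem.Dict.contains_eq_isSome_get?, hd]; rfl
        simp [pvStep, hc, pvComb, hd, PySem.Dict.getD_eq_get?_getD]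
    · have hb : (x.2 == k) = false := by simp [h]
      have hk : k ≠ x.2 := fun hk => h hk.symm
      have hs : (pvStep d x).get? k = d.get? k := by
        unfold pvStep
        by_cases hc : d.contains x.2 <;> simp [hc, PySem.Dict.get?_insert, hk]
      simp only [hb, Bool.false_eq_true, if_neg, not_false_iff, hs]

lemma foldl_pvComb_some (vs : List String) (a : String) :
    vs.foldl pvComb (some a) = some (vs.foldl pvMergeA a) := by
  induction vs generalizing a with
  | nil => rfl
  | cons v t ih => simp [pvComb, ih]

lemma get?_fold_empty (log : List (String × String)) (k : String) :
    (log.foldl pvStep PySem.Dict.empty).get? k =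
      match pvValsOf log k with
      | [] => none
      | v :: rest => some (pvSquash (v :: rest)) := by
  rw [get?_fold, PySem.Dict.get?_empty]
  cases h : pvValsOf log k with
  | nil => rfl
  | cons v rest =>
    have : pvComb none v = some v := rfl
    simp [List.foldl_cons, this, foldl_pvComb_some, pvSquash, pvMergeA_eq_B]

lemma nodup_keys_fold (log : List (String × String)) :
    (log.foldl pvStep PySem.Dict.empty).keys.Nodup := by
  rw [pvStep_eq_insert]
  exact PySem.Dict.nodup_keys_foldl_insert_key log (fun x => x.2) _ _ PySem.Dict.nodup_keys_empty

lemma valsOf_ne_nil_iff (log : List (String × String)) (k : String) :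
    pvValsOf log k ≠ [] ↔ k ∈ log.map (fun x => x.2) := by
  unfold pvValsOf
  rw [ne_eq, List.map_eq_nil_iff, List.filter_eq_nil_iff]
  push Not
  constructor
  · rintro ⟨x, hx, hk⟩
    exact List.mem_map.2 ⟨x, hx, by simpa using hk⟩
  · rintro hk
    rcases List.mem_map.1 hk with ⟨x, hx, hxk⟩
    exact ⟨x, hx, by simp [hxk]⟩

-- the sorted item list of A's dict IS B's key-ordered group list (swapped)
lemma sorted_items_eq (log : List (String × String)) :
    PySem.List.sorted (log.foldl pvStep PySem.Dict.empty).items (fun s => s.1) false =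
      (PySem.List.sorted (PySem.Set.ofList (log.map (fun x => x.2))) (fun k => k) false).map
        (fun k => (k, pvSquash (pvValsOf log k))) := by
  set p := log.foldl pvStep PySem.Dict.empty with hp
  set K := PySem.List.sorted (PySem.Set.ofList (log.map (fun x => x.2))) (fun k => k) false with hK
  apply PySem.List.sorted_eq_of_perm_of_pairwise_lt
  · -- permutation
    have hnodupK : K.Nodup :=
      (PySem.List.sorted_perm _ _ _).nodup_iff.2 (PySem.Set.nodup_ofList _)
    have hnodupT : (K.map (fun k => (k, pvSquash (pvValsOf log k)))).Nodup :=
      hnodupK.map (fun a b h => congrArg Prod.fst h)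
    have hnodupI : p.items.Nodup := (nodup_keys_fold log).of_map
    rw [List.perm_ext_iff_of_nodup hnodupT hnodupI]
    intro a
    constructor
    · intro ha
      rcases List.mem_map.1 ha with ⟨k, hk, hka⟩
      have hkl : k ∈ log.map (fun x => x.2) := by
        rw [← PySem.Set.mem_ofList]; exact (PySem.List.mem_sorted _ _ _ _).1 hk
      have hne := (valsOf_ne_nil_iff log k).2 hkl
      cases hv : pvValsOf log k with
      | nil => exact absurd hv hne
      | cons v rest =>
        have : p.get? k = some (pvSquash (v :: rest)) := by
          rw [hp, get?_fold_empty, hv]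
        rw [← hka]
        have := (PySem.Dict.get?_eq_some_iff_mem_items p k _ (nodup_keys_fold log)).1 this
        simpa [hv] using this
    · intro ha
      have hget : p.get? a.1 = some a.2 :=
        (PySem.Dict.get?_eq_some_iff_mem_items p a.1 a.2 (nodup_keys_fold log)).2 (by simpa using ha)
      rw [hp, get?_fold_empty] at hget
      cases hv : pvValsOf log a.1 with
      | nil => rw [hv] at hget; exact absurd hget (by simp)
      | cons v rest =>
        rw [hv] at hget
        have ha2 : a.2 = pvSquash (pvValsOf log a.1) := by
          rw [hv]; exact (Option.some.inj hget).symm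
        have hkl : a.1 ∈ K := by
          rw [hK, PySem.List.mem_sorted, PySem.Set.mem_ofList]
          exact (valsOf_ne_nil_iff log a.1).1 (by rw [hv]; simp)
        exact List.mem_map.2 ⟨a.1, hkl, by rw [← ha2]⟩
  · -- strictly increasing first components
    have := PySem.List.sorted_ofList_pairwise_lt (log.map (fun x => x.2))
    rw [← hK] at this
    exact List.pairwise_map.2 (by simpa using this)

-- one ascending sort on the NEGATED count is A's reverse=True sort on the count
lemma sorted_neg_eq_rev (xs : List (String × String)) :
    PySem.List.sorted xs (fun t => pvNegRevealedB t.1) false =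
      PySem.List.sorted xs (fun s => pvNumRevealedA s.1) true := by
  rw [PySem.List.sorted_eq_foldl_insertBy, PySem.List.sorted_rev_eq_foldl_insertBy]
  congr 1
  funext acc x
  congr 1
  funext a b
  simp [pvNegRevealedB, pvNumRevealedA, List.countP_eq_length_filter, Nat.cast_lt]

-- ===== VERDICT (by name: the statement is the Claim_ definition above) =====
theorem hacker_spec : Claim_equal_hacker := by
  intro log _
  unfold Spec_hacker hacker hacker_alt
  have hfold : (fun (p : PySem.Dict String String) (x : String × String) =>
      if p.contains x.2 then p.insert x.2 (pvMergeA (p.getD x.2 "") x.1)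
      else p.insert x.2 x.1) = pvStep := rfl
  rw [hfold, sorted_items_eq, List.map_map, sorted_neg_eq_rev]
  rfl
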